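-- pv_equiv track=rewrite | github.com/thobotics/geometry_rl | ironlib/orbit/tasks/common/sim_utils.py | assign_subarray_indices
-- ===== SOURCE A (Python) =====
-- def assign_subarray_indices(n, m):
--     # Calculate the base size and the number of elements in larger subarrays
--     base_size = n // m
--     extras = n % m
--
--     indices = []
--     for i in range(m):
--         # If there are extras, add one more to the current subarray
--         size = base_size + (1 if i < extras else 0)
--         # Extend the indices list with `size` number of current index `i`
--         indices.extend([i] * size)
--
--     return indices
-- ===== SOURCE B (Python) =====
-- def assign_subarray_indices(n, m):
--     # Per-index closed form: position j belongs to bucket j//(base_size+1)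
--     # inside the first `extras` (larger) buckets, and past that cut-off to
--     # bucket extras + (j - cut) // base_size.
--     base_size = n // m
--     extras = n % m
--     cut = extras * (base_size + 1)
--     return [
--         j // (base_size + 1) if j < cut else extras + (j - cut) // base_size
--         for j in range(n)
--     ]
-- ===== Notes on version B (the rewrite author's own statement) =====
-- stated objective: alternative
-- what changed: Instead of looping over the m buckets and block-extending with [i]*size, B loops over the n output positions and computes each position's bucket index by closed-form floor-division arithmetic.
-- outside the precondition, e.g. on assign_subarray_indices(3, -2): A returns [], B returns [0, -1, -2]
import Mathlib
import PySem

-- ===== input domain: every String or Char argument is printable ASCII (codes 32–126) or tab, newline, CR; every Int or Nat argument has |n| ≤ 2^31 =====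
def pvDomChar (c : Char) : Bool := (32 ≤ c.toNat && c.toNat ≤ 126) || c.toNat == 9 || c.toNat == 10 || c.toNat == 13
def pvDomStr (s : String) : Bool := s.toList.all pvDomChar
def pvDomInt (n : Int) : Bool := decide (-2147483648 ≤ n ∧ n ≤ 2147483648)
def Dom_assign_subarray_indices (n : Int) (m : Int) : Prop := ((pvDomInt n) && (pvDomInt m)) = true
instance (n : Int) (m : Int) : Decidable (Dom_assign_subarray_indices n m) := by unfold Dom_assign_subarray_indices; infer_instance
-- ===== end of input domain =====

-- B replaces A's bucket-by-bucket block extension with a per-output-position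
-- closed-form bucket computation (alternative decomposition, same cost class).


-- ===== PORT A =====
-- `[i] * size` for a possibly negative Int size is List.replicate size.toNat i
-- (Python list repetition with a non-positive count yields []; toNat clamps the same way).
def assign_subarray_indices (n : Int) (m : Int) : List Int :=
  let base_size := PySem.Int.floordiv n m
  let extras := PySem.Int.mod n m
  (PySem.List.pyRange 0 m 1).foldl
    (fun indices i =>
      let size := base_size + (if i < extras then (1 : Int) else 0)
      indices ++ List.replicate size.toNat i)
    []

-- ===== PORT B =====
def assign_subarray_indices_alt (n : Int) (m : Int) : List Int :=
  let base_size := PySem.Int.floordiv n m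
  let extras := PySem.Int.mod n m
  let cut := extras * (base_size + 1)
  (PySem.List.pyRange 0 n 1).map
    (fun j =>
      if j < cut then PySem.Int.floordiv j (base_size + 1)
      else extras + PySem.Int.floordiv (j - cut) base_size)

-- ===== PRECONDITION & SPEC =====
-- Pre_ excludes m ≤ 0: at m = 0 A raises ZeroDivisionError (so does B); for m < 0 —
-- a meaningless negative bucket count outside the function's natural domain — A's
-- empty range(m) loop happens to return [] while B's per-position arithmetic does not.
def Pre_assign_subarray_indices (n : Int) (m : Int) : Prop := 1 ≤ m
instance (n : Int) (m : Int) : Decidable (Pre_assign_subarray_indices n m) := by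
  unfold Pre_assign_subarray_indices; infer_instance

def pvWitness_assign_subarray_indices : Int × Int := (7, 3)

def Spec_assign_subarray_indices (n : Int) (m : Int) (out : List Int) : Prop := out = assign_subarray_indices_alt n m
instance (n : Int) (m : Int) (out : List Int) : Decidable (Spec_assign_subarray_indices n m out) := by unfold Spec_assign_subarray_indices; infer_instance

-- ===== CLAIM (what is proved, stated in full; the proofs are below) =====
def Claim_equal_assign_subarray_indices : Prop := ∀ (n : Int) (m : Int), Dom_assign_subarray_indices n m → Pre_assign_subarray_indices n m → Spec_assign_subarray_indices n m (assign_subarray_indices n m)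

-- ===== LEMMAS AND PROOFS =====

-- The bucket of output position j, for base size b with e larger (b+1) buckets.
def pvBucket (b e : Int) (j : Int) : Int :=
  if j < e * (b + 1) then PySem.Int.floordiv j (b + 1)
  else e + PySem.Int.floordiv (j - e * (b + 1)) b

-- A's shape: concatenated constant blocks, one per bucket.
def pvBlocks (b e : Int) (k : Nat) : List Int :=
  (PySem.List.pyRange 0 (k : Int) 1).flatMap
    (fun i => List.replicate (b + if i < e then (1 : Int) else 0).toNat i)

-- B's shape: per-position bucket over the b*k+e output positions.
def pvMapped (b e : Int) (k : Nat) : List Int :=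
  (PySem.List.pyRange 0 (b * k + e) 1).map (pvBucket b e)

lemma pvFlatMap_congr {l : List Int} {f g : Int → List Int} (h : ∀ x ∈ l, f x = g x) :
    l.flatMap f = l.flatMap g := by
  induction l with
  | nil => rfl
  | cons a t ih =>
    simp only [List.flatMap_cons, h a (List.mem_cons_self), ih fun x hx => h x (List.mem_cons_of_mem a hx)]

lemma pvPiece2 (b e : Int) (k : Nat) (hb : 0 ≤ b) (_he : 0 ≤ e) (hek : e ≤ (k : Int)) :
    (PySem.List.pyRange (b * k + e) (b * ((k : Int) + 1) + e) 1).map (pvBucket b e)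
      = List.replicate b.toNat (k : Int) := by
  refine List.eq_replicate_iff.mpr ⟨?_, ?_⟩
  · rw [List.length_map, PySem.List.length_pyRange_one]
    congr 1
    ring
  · intro x hx
    rcases List.mem_map.mp hx with ⟨j, hj, rfl⟩
    rcases PySem.List.mem_pyRange_one.mp hj with ⟨h0, h1⟩
    have hbpos : 0 < b := by nlinarith
    have hcut : e * (b + 1) ≤ b * k + e := by nlinarith
    rw [pvBucket, if_neg (by omega)]
    have hq : PySem.Int.floordiv (j - e * (b + 1)) b = (k : Int) - e := by
      rw [PySem.Int.floordiv_eq_iff_of_pos hbpos]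
      constructor <;> nlinarith
    rw [hq]; ring


lemma pvKey : ∀ (k : Nat), 1 ≤ k → ∀ (b e : Int), 0 ≤ b → 0 ≤ e → e < (k : Int) →
    pvBlocks b e k = pvMapped b e k := by
  intro k hk
  induction k, hk using Nat.le_induction with
  | base =>
    intro b e hb he hek
    simp only [Nat.cast_one] at hek ⊢
    have he0 : e = 0 := by omega
    subst he0
    have hr : PySem.List.pyRange 0 (1:Int) 1 = [0] := by decide
    rw [pvBlocks, Nat.cast_one, hr]
    simp only [List.flatMap_cons, List.flatMap_nil, List.append_nil]
    rw [if_neg (by omega), add_zero]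
    refine (List.eq_replicate_iff.mpr ⟨?_, ?_⟩).symm
    · rw [pvMapped, Nat.cast_one, List.length_map, PySem.List.length_pyRange_one]
      congr 1
      ring
    · intro x hx
      rw [pvMapped, Nat.cast_one] at hx
      rcases List.mem_map.mp hx with ⟨j, hj, rfl⟩
      rcases PySem.List.mem_pyRange_one.mp hj with ⟨h0, h1⟩
      have hbpos : 0 < b := by nlinarith
      rw [pvBucket, if_neg (by omega)]
      have hq : PySem.Int.floordiv (j - 0 * (b + 1)) b = 0 := by
        rw [PySem.Int.floordiv_eq_iff_of_pos hbpos]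
        constructor <;> nlinarith
      rw [hq]
      norm_num
  | succ k hk IH =>
    intro b e hb he hek
    have hkz : (0:Int) ≤ (k:Int) := by positivity
    have hek' : e ≤ (k:Int) := by
      have : (((k+1:Nat)):Int) = (k:Int) + 1 := by push_cast; ring
      omega
    -- split A side
    have hA : pvBlocks b e (k+1)
        = (PySem.List.pyRange 0 (k:Int) 1).flatMap
            (fun i => List.replicate (b + if i < e then (1 : Int) else 0).toNat i)
          ++ List.replicate b.toNat (k:Int) := by
      rw [pvBlocks]
      rw [show (((k+1:Nat)):Int) = (k:Int) + 1 by push_cast; ring]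
      rw [PySem.List.pyRange_one_succ_right hkz, List.flatMap_append]
      simp only [List.flatMap_cons, List.flatMap_nil, List.append_nil]
      rw [if_neg (by omega), add_zero]
    -- split B side
    have hB : pvMapped b e (k+1)
        = (PySem.List.pyRange 0 (b * (k:Int) + e) 1).map (pvBucket b e)
          ++ List.replicate b.toNat (k:Int) := by
      rw [pvMapped]
      rw [show (((k+1:Nat)):Int) = (k:Int) + 1 by push_cast; ring]
      rw [PySem.List.pyRange_one_append 0 (b * (k:Int) + e) (b * ((k:Int)+1) + e)
            (by nlinarith) (by nlinarith)]
      rw [List.map_append, pvPiece2 b e k hb he hek']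
    rw [hA, hB]
    congr 1
    by_cases hke : e = (k:Int)
    · -- all first k buckets have size b+1; they re-partition as (b+1, extras 0)
      subst hke
      have hfm : (PySem.List.pyRange 0 (k:Int) 1).flatMap
            (fun i => List.replicate (b + if i < (k:Int) then (1 : Int) else 0).toNat i)
          = pvBlocks (b+1) 0 k := by
        rw [pvBlocks]
        refine pvFlatMap_congr (fun x hx => ?_)
        rcases PySem.List.mem_pyRange_one.mp hx with ⟨hx0, hx1⟩
        rw [if_pos hx1, if_neg (by omega : ¬ x < (0:Int))]
        norm_num
      rw [hfm, IH (b+1) 0 (by omega) le_rfl (by exact_mod_cast hk)]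
      rw [pvMapped]
      rw [show (b+1) * (k:Int) + 0 = b * (k:Int) + (k:Int) by ring]
      refine (List.map_congr_left ?_).symm
      intro j hj
      rcases PySem.List.mem_pyRange_one.mp hj with ⟨h0, h1⟩
      rw [pvBucket, pvBucket, if_pos (by nlinarith), if_neg (by omega)]
      rw [zero_mul, sub_zero, zero_add]
    · -- e < k : the first k buckets are exactly the (b, e) partition of b*k+e
      exact IH b e hb he (by omega)

lemma pv_ports_eq (n m : Int) (hm : 1 ≤ m) : assign_subarray_indices n m = assign_subarray_indices_alt n m := by
  have hm0 : 0 < m := hm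
  have hbe : PySem.Int.floordiv n m * m + PySem.Int.mod n m = n :=
    PySem.Int.floordiv_mul_add_mod n m
  have he0 : 0 ≤ PySem.Int.mod n m := PySem.Int.mod_nonneg n hm0
  have hem : PySem.Int.mod n m < m := PySem.Int.mod_lt n hm0
  set b := PySem.Int.floordiv n m with hb
  set e := PySem.Int.mod n m with he
  by_cases hn : 0 ≤ n
  · have hb0 : 0 ≤ b := by nlinarith
    have hmt : ((m.toNat : Int)) = m := Int.toNat_of_nonneg (by omega)
    have hk := pvKey m.toNat (by omega) b e hb0 he0 (by omega)
    unfold pvBlocks pvMapped at hk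
    rw [hmt] at hk
    simp only [assign_subarray_indices, assign_subarray_indices_alt, ← hb, ← he]
    rw [PySem.List.foldl_append_eq_flatMap, List.nil_append, hk, hbe]
    rfl
  · -- n < 0 : both sides empty
    have hbneg : b < 0 := by nlinarith
    simp only [assign_subarray_indices, assign_subarray_indices_alt, ← hb, ← he]
    rw [PySem.List.foldl_append_eq_flatMap, List.nil_append,
        PySem.List.pyRange_one_eq_nil (by omega : n ≤ 0), List.map_nil,
        List.flatMap_eq_nil_iff.mpr]
    intro i _
    have : (b + if i < e then (1:Int) else 0).toNat = 0 := by
      split <;> omega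
    rw [this, List.replicate_zero]

-- ===== VERDICT (by name: the statement is the Claim_ definition above) =====
theorem assign_subarray_indices_spec : Claim_equal_assign_subarray_indices := by
  intro n m _ hpre
  exact pv_ports_eq n m hpre
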